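-- pv_equiv track=rewrite | github.com/MouinulIslamNJIT/BallotChange | calculateMargin.py | findq
-- ===== SOURCE A (Python) =====
-- def findq(Lv,Lc,a,b):
--     cnta = 0
--     cntb = 0
--     qmin = 0
--     qmax = 0
--     for (c,v) in zip(Lc,Lv):
--         if(c == "A"):
--             cnta += 1
--             if(cnta == a):
--                 qmin = v
--         if(c == "B"):
--             cntb += 1
--             if(cntb == b):
--                 qmax = v
--     return qmin,qmax
-- ===== SOURCE B (Python) =====
-- def findq(Lv, Lc, a, b):
--     va = [v for c, v in zip(Lc, Lv) if c == "A"]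
--     vb = [v for c, v in zip(Lc, Lv) if c == "B"]
--     qmin = va[a - 1] if 1 <= a <= len(va) else 0
--     qmax = vb[b - 1] if 1 <= b <= len(vb) else 0
--     return qmin, qmax
-- ===== Notes on version B (the rewrite author's own statement) =====
-- stated objective: simpler
-- what changed: Replaces the interleaved counter-and-capture loop by a collect-then-index decomposition: build the lists of A-values and B-values, then pick the a-th / b-th element with a guarded index (0 when out of range).
import Mathlib
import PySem

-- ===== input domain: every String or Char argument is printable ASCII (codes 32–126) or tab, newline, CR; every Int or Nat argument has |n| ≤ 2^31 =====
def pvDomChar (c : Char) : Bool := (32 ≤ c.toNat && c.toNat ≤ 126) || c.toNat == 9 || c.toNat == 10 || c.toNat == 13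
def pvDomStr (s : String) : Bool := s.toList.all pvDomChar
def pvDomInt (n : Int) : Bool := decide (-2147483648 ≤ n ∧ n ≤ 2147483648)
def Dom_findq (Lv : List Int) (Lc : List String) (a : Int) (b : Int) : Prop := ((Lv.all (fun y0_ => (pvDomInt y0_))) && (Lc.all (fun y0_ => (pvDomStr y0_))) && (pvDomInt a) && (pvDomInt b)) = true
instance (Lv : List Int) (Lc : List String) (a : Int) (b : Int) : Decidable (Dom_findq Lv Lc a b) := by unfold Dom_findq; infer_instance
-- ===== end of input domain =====

-- B replaces A's interleaved counter-and-capture loop by a collect-then-index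
-- decomposition (filter the A/B values, then a guarded index); objective: simpler.


-- ===== PORT A =====
-- one iteration of A's loop body over the state (cnta, cntb, qmin, qmax)
def findqStep (a b : Int) (st : Int × Int × Int × Int) (cv : String × Int) : Int × Int × Int × Int :=
  let cnta := st.1; let cntb := st.2.1; let qmin := st.2.2.1; let qmax := st.2.2.2
  let c := cv.1; let v := cv.2
  let cnta := if c == "A" then cnta + 1 else cnta
  let qmin := if c == "A" ∧ cnta = a then v else qmin
  let cntb := if c == "B" then cntb + 1 else cntb
  let qmax := if c == "B" ∧ cntb = b then v else qmax
  (cnta, cntb, qmin, qmax)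

def findq (Lv : List Int) (Lc : List String) (a : Int) (b : Int) : Int × Int :=
  let s := (List.zip Lc Lv).foldl (findqStep a b) (0, 0, 0, 0)
  (s.2.2.1, s.2.2.2)

-- ===== PORT B =====
-- the guarded index from Source B: xs[n-1] if 1 <= n <= len(xs) else 0
def pickq (xs : List Int) (n : Int) : Int :=
  if 1 ≤ n ∧ n ≤ xs.length then xs.getD (n - 1).toNat 0 else 0

def findq_alt (Lv : List Int) (Lc : List String) (a : Int) (b : Int) : Int × Int :=
  let va := ((List.zip Lc Lv).filter (fun cv => cv.1 == "A")).map (fun cv => cv.2)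
  let vb := ((List.zip Lc Lv).filter (fun cv => cv.1 == "B")).map (fun cv => cv.2)
  (pickq va a, pickq vb b)

-- ===== PRECONDITION & SPEC =====
def Spec_findq (Lv : List Int) (Lc : List String) (a : Int) (b : Int) (out : Int × Int) : Prop := out = findq_alt Lv Lc a b
instance (Lv : List Int) (Lc : List String) (a : Int) (b : Int) (out : Int × Int) : Decidable (Spec_findq Lv Lc a b out) := by unfold Spec_findq; infer_instance

-- ===== CLAIM (what is proved, stated in full; the proofs are below) =====
def Claim_equal_findq : Prop := ∀ (Lv : List Int) (Lc : List String) (a : Int) (b : Int), Dom_findq Lv Lc a b → Spec_findq Lv Lc a b (findq Lv Lc a b)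

-- ===== LEMMAS AND PROOFS =====

-- guarded index with an arbitrary default, for the loop invariant
def pickD (xs : List Int) (n : Int) (d : Int) : Int :=
  if 1 ≤ n ∧ n ≤ xs.length then xs.getD (n - 1).toNat 0 else d

theorem pickD_cons (v : Int) (xs : List Int) (n d : Int) :
    pickD (v :: xs) n d = pickD xs (n - 1) (if n = 1 then v else d) := by
  unfold pickD
  simp only [List.length_cons, Nat.cast_add, Nat.cast_one]
  by_cases h1 : n = 1
  · subst h1; simp
  · split_ifs with h2 h3 h3
    · have hidx : (n - 1).toNat = (n - 1 - 1).toNat + 1 := by omega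
      rw [hidx, List.getD_cons_succ]
    · exfalso; omega
    · exfalso; omega
    · simp

theorem findq_loop_inv (a b : Int) (l : List (String × Int)) :
    ∀ (ca cb m M : Int),
      l.foldl (findqStep a b) (ca, cb, m, M) =
        (ca + ((l.filter (fun cv => cv.1 == "A")).length : Int),
         cb + ((l.filter (fun cv => cv.1 == "B")).length : Int),
         pickD ((l.filter (fun cv => cv.1 == "A")).map (fun cv => cv.2)) (a - ca) m,
         pickD ((l.filter (fun cv => cv.1 == "B")).map (fun cv => cv.2)) (b - cb) M) := by
  induction l with
  | nil =>
    intro ca cb m M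
    simp only [List.foldl_nil, List.filter_nil, List.map_nil, List.length_nil, Nat.cast_zero,
      add_zero, pickD, List.length_nil, Prod.mk.injEq]
    refine ⟨trivial, trivial, ?_, ?_⟩ <;> (split_ifs with h <;> omega)
  | cons cv t ih =>
    intro ca cb m M
    obtain ⟨c, v⟩ := cv
    by_cases hA : c = "A"
    · subst hA
      simp only [List.foldl_cons, findqStep, List.filter_cons]
      have hB : ¬ (("A" : String) = "B") := by decide
      simp only [beq_self_eq_true, beq_iff_eq, hB, ite_false, ite_true, true_and, false_and]
      rw [ih]
      simp only [List.map_cons, List.length_cons, pickD_cons, Prod.mk.injEq]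
      refine ⟨by push_cast; ring, trivial, ?_, trivial⟩
      have e1 : a - (ca + 1) = a - ca - 1 := by ring
      rw [e1]
      congr 1
      by_cases h1 : ca + 1 = a
      · simp [h1, show a - ca = 1 by omega]
      · simp [h1, show ¬ (a - ca = 1) by omega]
    · by_cases hB : c = "B"
      · subst hB
        simp only [List.foldl_cons, findqStep, List.filter_cons]
        have hA' : ¬ (("B" : String) = "A") := by decide
        simp only [beq_self_eq_true, beq_iff_eq, hA', ite_false, ite_true, true_and, false_and]
        rw [ih]
        simp only [List.map_cons, List.length_cons, pickD_cons, Prod.mk.injEq]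
        refine ⟨trivial, by push_cast; ring, trivial, ?_⟩
        have e1 : b - (cb + 1) = b - cb - 1 := by ring
        rw [e1]
        congr 1
        by_cases h1 : cb + 1 = b
        · simp [h1, show b - cb = 1 by omega]
        · simp [h1, show ¬ (b - cb = 1) by omega]
      · simp only [List.foldl_cons, findqStep, List.filter_cons]
        simp only [beq_iff_eq, hA, hB, ite_false, false_and]
        exact ih ca cb m M

-- ===== VERDICT (by name: the statement is the Claim_ definition above) =====
theorem findq_spec : Claim_equal_findq := by
  intro Lv Lc a b _
  unfold Spec_findq findq findq_alt
  rw [findq_loop_inv]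
  simp [pickD, pickq]
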